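-- pv_equiv track=rewrite | github.com/ITlearning/Algorithm_Solved | Python/ThisIsCodingTest/PreviousProblems/Implementation/09.py | solution
-- ===== SOURCE A (Python) =====
-- def solution(s):
--     length = []
--     result = ""
--
--     if len(s) == 1:
--         return 1
--
--     for i in range(1,len(s)//2 + 1) :
--         cnt = 1
--         tempStr = s[:i]
--         for j in range(i, len(s), i):
--             if s[j:j+i] == tempStr:
--                 cnt += 1
--             else:
--                 if cnt == 1:
--                     cnt = ""
--                 result += str(cnt) + tempStr
--                 tempStr = s[j:j+i]
--                 cnt = 1
--         if cnt == 1: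
--             cnt = ""
--         result += str(cnt) + tempStr
--         length.append(len(result))
--         result = ""
--
--     return min(length)
-- ===== SOURCE B (Python) =====
-- def _clen(s, i):
--     n = len(s)
--     nfull = n // i
--     bounds = [r for r in range(1, nfull)
--               if any(s[r*i + t] != s[(r-1)*i + t] for t in range(i))]
--     runs = [e - b for b, e in zip([0] + bounds, bounds + [nfull])]
--     return i * len(runs) + sum(len(str(c)) for c in runs if c > 1) + n % i
--
--
-- def solution(s):
--     n = len(s)
--     if n == 1:
--         return 1
--     return min(_clen(s, i) for i in range(1, n // 2 + 1))
-- ===== Notes on version B (the rewrite author's own statement) =====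
-- stated objective: alternative
-- what changed: Per candidate chunk size i, B computes the list of run-boundary indices by the character-level offset self-comparison s[r*i+t] != s[(r-1)*i+t], derives each run length by differencing consecutive boundary positions, and evaluates the closed formula i*len(runs) + digit-sum + n%i - it never slices chunks, never keeps a run counter, and never builds the compressed string that A concatenates and measures.
import Mathlib
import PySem

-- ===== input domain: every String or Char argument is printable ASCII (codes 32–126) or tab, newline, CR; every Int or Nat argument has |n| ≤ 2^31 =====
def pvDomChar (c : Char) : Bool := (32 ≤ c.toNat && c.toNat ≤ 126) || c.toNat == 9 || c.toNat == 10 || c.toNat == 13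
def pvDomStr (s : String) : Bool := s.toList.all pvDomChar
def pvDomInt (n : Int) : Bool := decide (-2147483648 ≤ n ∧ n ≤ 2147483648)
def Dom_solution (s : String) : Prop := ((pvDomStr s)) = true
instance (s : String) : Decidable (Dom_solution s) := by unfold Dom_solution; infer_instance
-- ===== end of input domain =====

-- B replaces A's run-counting-and-string-building by a staged computation per chunk size: the
-- run-boundary indices are found by the character-level offset self-comparison s[r*i+t] != s[(r-1)*i+t],
-- run lengths are the differences of consecutive boundary positions, and the compressed length is the
-- closed formula i*len(runs) + digit-sum + n%i; B never builds the compressed text A concatenates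
-- (objective: alternative - a different decomposition of the same cost, no speed claim).

-- ===== PORT A =====
def solution (s : String) : Int :=
  let cs := s.toList
  if cs.length = 1 then 1
  else
    let lengths : List Int :=
      (PySem.List.pyRange 1 (PySem.Int.floordiv (cs.length : Int) 2 + 1) 1).foldl
        (fun (lengths : List Int) (i : Int) =>
          let st :=
            (PySem.List.pyRange i (cs.length : Int) i).foldl
              (fun (st : Int × List Char × List Char) (j : Int) =>
                let chunk := PySem.List.slice cs (some j) (some (j + i))
                if chunk = st.2.1 then (st.1 + 1, st.2.1, st.2.2)
                else
                  ((1 : Int), chunk,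
                    st.2.2 ++ (if st.1 = 1 then ([] : List Char) else PySem.Int.toChars st.1)
                      ++ st.2.1))
              ((1 : Int), PySem.List.slice cs none (some i), ([] : List Char))
          lengths ++
            [(((st.2.2 ++ (if st.1 = 1 then ([] : List Char) else PySem.Int.toChars st.1)
                ++ st.2.1).length : Int))])
        []
    match PySem.List.min? lengths (fun x => x) with
    | some m => m
    | none => 0   -- dead under Pre_solution: Python raises ValueError on min([]) (empty s)

-- ===== PORT B =====
-- _clen(s, i): boundary indices by char offset comparison, run lengths by differencing, closed formula.
-- (s[k] is ported as pyGetD with an unused default: every index k below is provably in range.)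
def clen (cs : List Char) (i : Int) : Int :=
  let n : Int := (cs.length : Int)
  let nfull : Int := PySem.Int.floordiv n i
  let bounds : List Int :=
    (PySem.List.pyRange 1 nfull 1).filter
      (fun r => (PySem.List.pyRange 0 i 1).any
        (fun t => PySem.List.pyGetD cs (r * i + t) ' ' != PySem.List.pyGetD cs ((r - 1) * i + t) ' '))
  let runs : List Int :=
    (List.zip ((0 : Int) :: bounds) (bounds ++ [nfull])).map (fun be => be.2 - be.1)
  i * (runs.length : Int)
    + (((runs.filter (fun c => decide (1 < c))).map
          (fun c => ((PySem.Int.toChars c).length : Int))).sum)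
    + PySem.Int.mod n i

def solution_alt (s : String) : Int :=
  let cs := s.toList
  if cs.length = 1 then 1
  else
    match PySem.List.min?
        ((PySem.List.pyRange 1 (PySem.Int.floordiv (cs.length : Int) 2 + 1) 1).map
          (fun i => clen cs i)) (fun x => x) with
    | some m => m
    | none => 0   -- dead under Pre_solution: Python raises ValueError on min of an empty generator (empty s)

-- ===== PRECONDITION & SPEC =====
-- Pre_ excludes only the empty string, on which A raises ValueError (min of an empty list; B raises too).
def Pre_solution (s : String) : Prop := s ≠ ""
instance (s : String) : Decidable (Pre_solution s) := by unfold Pre_solution; infer_instance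
def pvWitness_solution : String := "aabbaccc"

def Spec_solution (s : String) (out : Int) : Prop := out = solution_alt s
instance (s : String) (out : Int) : Decidable (Spec_solution s out) := by unfold Spec_solution; infer_instance

-- ===== CLAIM (what is proved, stated in full; the proofs are below) =====
def Claim_equal_solution : Prop := ∀ (s : String), Dom_solution s → Pre_solution s → Spec_solution s (solution s)

-- ===== LEMMAS AND PROOFS =====

-- how many leading chunks equal c
def countLead (c : List Char) : List (List Char) → Nat
  | [] => 0
  | d :: rest => if d = c then countLead c rest + 1 else 0

-- the encoding A appends per run: decimal count (omitted when 1) followed by the chunk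
def encChars (cnt : Int) (temp : List Char) : List Char :=
  (if cnt = 1 then ([] : List Char) else PySem.Int.toChars cnt) ++ temp

-- specification of one chunk size's compressed length, as a left fold over (cnt, temp)
def g : List (List Char) → Int → List Char → Int
  | [], cnt, temp => ((encChars cnt temp).length : Int)
  | c :: chs, cnt, temp =>
      if c = temp then g chs (cnt + 1) temp
      else ((encChars cnt temp).length : Int) + g chs 1 c

def g0 : List (List Char) → Int
  | [] => 0
  | c :: rest => g rest 1 c

-- the list of i-sized chunks of cs
def chunkList (cs : List Char) (i : Nat) : List (List Char) :=
  if h : i = 0 ∨ cs = [] then [] else cs.take i :: chunkList (cs.drop i) i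
termination_by cs.length
decreasing_by
  push Not at h
  have hpos : 0 < cs.length := List.length_pos_iff.mpr h.2
  simp [List.length_drop]; omega

-- A's inner-loop step, as a function of the current chunk
def stepC : (Int × List Char × List Char) → List Char → (Int × List Char × List Char) :=
  fun st chunk =>
    if chunk = st.2.1 then (st.1 + 1, st.2.1, st.2.2)
    else ((1 : Int), chunk,
      st.2.2 ++ (if st.1 = 1 then ([] : List Char) else PySem.Int.toChars st.1) ++ st.2.1)

-- per-chunk-size value of A (definitionally the port's inner computation)
def fA (cs : List Char) (i : Int) : Int :=
  let st :=
    (PySem.List.pyRange i (cs.length : Int) i).foldl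
      (fun st j => stepC st (PySem.List.slice cs (some j) (some (j + i))))
      ((1 : Int), PySem.List.slice cs none (some i), ([] : List Char))
  (((st.2.2 ++ (if st.1 = 1 then ([] : List Char) else PySem.Int.toChars st.1)
      ++ st.2.1).length : Int))

-- B-side abstractions: chunk r of size i, the full chunks, boundary indices, run lengths
def chunkAt (cs : List Char) (i r : Nat) : List Char := (cs.drop (r * i)).take i

def fullChunks (cs : List Char) (i nf : Nat) : List (List Char) :=
  (List.range nf).map (chunkAt cs i)

def bnds (L : List (List Char)) : List Nat :=
  (List.range' 1 (L.length - 1)).filter (fun r => L.getD r [] != L.getD (r - 1) [])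

def runsOf (L : List (List Char)) : List Int :=
  (List.zip ((0 : Int) :: (bnds L).map (Nat.cast)) ((bnds L).map (Nat.cast) ++ [(L.length : Int)])).map
    (fun be => be.2 - be.1)

def valB (i : Int) (L : List (List Char)) : Int :=
  i * ((runsOf L).length : Int)
    + ((((runsOf L).filter (fun c => decide (1 < c))).map
          (fun c => ((PySem.Int.toChars c).length : Int))).sum)

theorem pyRange_pos_cons {a b s : Int} (hs : 0 < s) (hab : a < b) :
    PySem.List.pyRange a b s = a :: PySem.List.pyRange (a + s) b s := by
  rw [PySem.List.pyRange_of_pos a b hs, PySem.List.pyRange_of_pos (a + s) b hs]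
  have hd1 : (b - a + s - 1) / s = (b - a - 1) / s + 1 := by
    have h : b - a + s - 1 = (b - a - 1) + 1 * s := by ring
    rw [h, Int.add_mul_ediv_right _ _ (by omega : s ≠ 0)]
  have hnn : 0 ≤ (b - a - 1) / s := Int.ediv_nonneg (by omega) (by omega)
  rw [if_pos hab, hd1]
  by_cases h2 : a + s < b
  · rw [if_pos h2]
    have h : b - (a + s) + s - 1 = b - a - 1 := by ring
    rw [h]
    have h3 : ((b - a - 1) / s + 1).toNat = ((b - a - 1) / s).toNat + 1 := by omega
    rw [h3, List.range_succ_eq_map, List.map_cons, List.map_map]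
    congr 1
    · simp
    · apply List.map_congr_left
      intro k _
      simp only [Function.comp_apply, Nat.succ_eq_add_one]
      push_cast
      ring
  · rw [if_neg h2]
    have hz : (b - a - 1) / s = 0 := Int.ediv_eq_zero_of_lt (by omega) (by omega)
    rw [hz]
    simp

theorem map_slice_eq_chunkList (i : Nat) (hi : 0 < i) (cs : List Char) :
    (PySem.List.pyRange 0 (cs.length : Int) (i : Int)).map
        (fun j => PySem.List.slice cs (some j) (some (j + (i : Int))))
      = chunkList cs i := by
  have hip : (0 : Int) < (i : Int) := by exact_mod_cast hi
  suffices H : ∀ n (cs : List Char), cs.length ≤ n →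
      (PySem.List.pyRange 0 (cs.length : Int) (i : Int)).map
          (fun j => PySem.List.slice cs (some j) (some (j + (i : Int))))
        = chunkList cs i from H cs.length cs le_rfl
  intro n
  induction n with
  | zero =>
    intro cs hlen
    have hnil : cs = [] := List.eq_nil_of_length_eq_zero (by omega)
    subst hnil
    rw [chunkList]
    simp [PySem.List.pyRange_of_pos 0 0 hip]
  | succ n ih =>
    intro cs hlen
    rcases List.eq_nil_or_concat cs with hnil | _
    · subst hnil
      rw [chunkList]
      simp [PySem.List.pyRange_of_pos 0 0 hip]
    case _ h =>
      have hne : cs ≠ [] := by rcases h with ⟨l, a, rfl⟩; simp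
      have hpos : 0 < cs.length := List.length_pos_iff.mpr hne
      have hcons := pyRange_pos_cons (a := 0) (b := (cs.length : Int)) hip (by exact_mod_cast hpos)
      rw [zero_add] at hcons
      rw [hcons, List.map_cons]
      rw [chunkList, dif_neg (by simp [hne]; omega)]
      have hhead : PySem.List.slice cs (some 0) (some (0 + (i : Int))) = cs.take i := by
        have h0 := PySem.List.slice_natCast_add cs 0 i
        simpa using h0
      rw [hhead]
      congr 1
      by_cases hle : i < cs.length
      · -- shift the range and recurse on the dropped list
        have hshift : PySem.List.pyRange (i : Int) (cs.length : Int) (i : Int)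
            = (PySem.List.pyRange 0 (((cs.drop i).length : Nat) : Int) (i : Int)).map
                (fun x => (i : Int) + x) := by
          rw [PySem.List.pyRange_of_pos _ _ hip, PySem.List.pyRange_of_pos _ _ hip]
          have hdl : ((cs.drop i).length : Int) = (cs.length : Int) - (i : Int) := by
            simp [List.length_drop]; omega
          rw [hdl]
          by_cases hab : (i : Int) < (cs.length : Int)
          · rw [if_pos hab, if_pos (by omega : (0:Int) < (cs.length : Int) - (i : Int))]
            rw [List.map_map]
            have hnum : (cs.length : Int) - (i : Int) - 0 + (i : Int) - 1
                = (cs.length : Int) - (i : Int) + (i : Int) - 1 := by ring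
            rw [hnum]
            apply List.map_congr_left
            intro k _
            simp only [Function.comp_apply]
            ring
          · rw [if_neg hab, if_neg (by omega : ¬ (0:Int) < (cs.length : Int) - (i : Int))]
            simp
        rw [hshift, List.map_map]
        have hih := ih (cs.drop i) (by simp [List.length_drop]; omega)
        rw [← hih]
        apply List.map_congr_left
        intro j hj
        have hj0 : 0 ≤ j := by
          have := (PySem.List.mem_pyRange_iff_of_pos hip j).mp hj
          omega
        obtain ⟨j', rfl⟩ : ∃ j' : Nat, j = (j' : Int) :=
          ⟨j.toNat, (Int.toNat_of_nonneg hj0).symm⟩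
        simp only [Function.comp_apply]
        have h1 : ((i : Int) + (j' : Int)) = ((i + j' : Nat) : Int) := by push_cast; ring
        rw [h1, PySem.List.slice_natCast_add cs (i + j') i,
          PySem.List.slice_natCast_add (cs.drop i) j' i, List.drop_drop]
      · -- i swallows all of cs: both sides are empty
        have h1 : PySem.List.pyRange (i : Int) (cs.length : Int) (i : Int) = [] := by
          rw [PySem.List.pyRange_of_pos _ _ hip, if_neg (by exact_mod_cast hle)]
          simp
        have h2 : cs.drop i = [] := List.drop_eq_nil_of_le (by omega)
        rw [h1, h2, chunkList]
        simp

theorem A_len (chs : List (List Char)) :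
    ∀ (cnt : Int) (temp res : List Char),
      (((List.foldl stepC (cnt, temp, res) chs).2.2
          ++ (if (List.foldl stepC (cnt, temp, res) chs).1 = 1 then ([] : List Char)
              else PySem.Int.toChars (List.foldl stepC (cnt, temp, res) chs).1)
          ++ (List.foldl stepC (cnt, temp, res) chs).2.1).length : Int)
        = (res.length : Int) + g chs cnt temp := by
  induction chs with
  | nil =>
    intro cnt temp res
    simp [g, encChars, List.length_append]
  | cons c chs ih =>
    intro cnt temp res
    simp only [List.foldl_cons]
    by_cases hc : c = temp
    · rw [show stepC (cnt, temp, res) c = (cnt + 1, temp, res) by simp [stepC, hc]]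
      rw [ih]
      simp [g, hc]
    · rw [show stepC (cnt, temp, res) c
          = ((1 : Int), c, res ++ (if cnt = 1 then ([] : List Char) else PySem.Int.toChars cnt) ++ temp) by
        simp [stepC, hc]]
      rw [ih]
      simp [g, hc, encChars, List.length_append]
      ring_nf

theorem gsplit (rest : List (List Char)) :
    ∀ (cnt : Int) (c : List Char),
      g rest cnt c
        = ((encChars (cnt + (countLead c rest : Int)) c).length : Int)
            + g0 (rest.drop (countLead c rest)) := by
  induction rest with
  | nil => intro cnt c; simp [g, g0, countLead]
  | cons d r ih =>
    intro cnt c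
    by_cases hdc : d = c
    · subst hdc
      have hcl : countLead d (d :: r) = countLead d r + 1 := by simp [countLead]
      rw [show g (d :: r) cnt d = g r (cnt + 1) d from by simp [g], ih, hcl,
        List.drop_succ_cons]
      have hx : cnt + 1 + (countLead d r : Int) = cnt + ((countLead d r + 1 : Nat) : Int) := by
        push_cast; ring
      rw [hx]
    · simp [g, countLead, hdc, g0]

-- fA is g0 of the chunk list
theorem fA_eq_g0 (cs : List Char) (i : Nat) (hi : 0 < i) (hlt : i < cs.length) :
    fA cs (i : Int) = g0 (chunkList cs i) := by
  have hcs : cs ≠ [] := by intro h; subst h; simp at hlt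
  have hip : (0 : Int) < (i : Int) := by exact_mod_cast hi
  have hchunks := map_slice_eq_chunkList i hi cs
  have hCL : chunkList cs i = cs.take i :: chunkList (cs.drop i) i := by
    rw [chunkList, dif_neg (by simp [hcs]; omega)]
  have hcons : PySem.List.pyRange 0 (cs.length : Int) (i : Int)
      = 0 :: PySem.List.pyRange (i : Int) (cs.length : Int) (i : Int) := by
    have h := pyRange_pos_cons (a := 0) (b := (cs.length : Int)) (s := (i : Int))
      hip (by have := List.length_pos_iff.mpr hcs; exact_mod_cast this)
    rwa [zero_add] at h
  have htail : (PySem.List.pyRange (i : Int) (cs.length : Int) (i : Int)).map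
      (fun j => PySem.List.slice cs (some j) (some (j + (i : Int))))
      = chunkList (cs.drop i) i := by
    have h := hchunks
    rw [hcons, List.map_cons, hCL] at h
    exact (List.cons_eq_cons.mp h).2
  have hhead : PySem.List.slice cs none (some (i : Int)) = cs.take i := by
    rw [PySem.List.slice_to cs (by omega)]
    simp
  unfold fA
  rw [← List.foldl_map, htail, hhead, A_len, hCL]
  show (0 : Int) + g (chunkList (cs.drop i) i) 1 (cs.take i) = g0 _
  simp [g0]

-- countLead facts
theorem countLead_le (c : List Char) (rest : List (List Char)) : countLead c rest ≤ rest.length := by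
  induction rest with
  | nil => simp [countLead]
  | cons d r ih =>
    by_cases h : d = c
    · simp [countLead, h]; omega
    · simp [countLead, h]

theorem countLead_getD (c : List Char) (rest : List (List Char)) :
    ∀ j, j < countLead c rest → rest.getD j [] = c := by
  induction rest with
  | nil => simp [countLead]
  | cons d r ih =>
    intro j hj
    by_cases h : d = c
    · cases j with
      | zero => simpa using h
      | succ j =>
        simp only [List.getD_cons_succ]
        apply ih
        simp [countLead, h] at hj
        omega
    · simp [countLead, h] at hj
  
theorem countLead_stop (c : List Char) (rest : List (List Char))
    (h : countLead c rest < rest.length) : rest.getD (countLead c rest) [] ≠ c := by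
  induction rest with
  | nil => simp at h
  | cons d r ih =>
    by_cases hd : d = c
    · simp only [countLead, if_pos hd]
      simp only [countLead, if_pos hd, List.length_cons] at h
      simpa using ih (by omega)
    · simpa [countLead, hd] using hd

theorem getD_drop' (l : List (List Char)) (k j : Nat) (h : k + j < l.length) :
    (l.drop k).getD j [] = l.getD (k + j) [] := by
  rw [List.getD_eq_getElem _ _ (by simp [List.length_drop]; omega),
    List.getD_eq_getElem _ _ h, List.getElem_drop]

theorem range'_shift (d s m : Nat) :
    List.range' (s + d) m = (List.range' s m).map (· + d) := by
  have h := List.map_add_range' (a := d) s m 1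
  simp only [Nat.add_comm d] at h ⊢
  simpa using h.symm

-- boundary-list structure: first run then shifted boundaries of the remainder
theorem bnds_cons (c : List Char) (rest : List (List Char)) :
    bnds (c :: rest) =
      if countLead c rest + 1 < (c :: rest).length
      then (countLead c rest + 1)
          :: (bnds ((c :: rest).drop (countLead c rest + 1))).map (· + (countLead c rest + 1))
      else [] := by
  obtain ⟨k, hk⟩ : ∃ k, countLead c rest = k := ⟨_, rfl⟩
  rw [hk]
  have hkle : k ≤ rest.length := hk ▸ countLead_le c rest
  have hgetD : ∀ j, j < k → rest.getD j [] = c := by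
    intro j hj
    exact countLead_getD c rest j (by omega)
  unfold bnds
  simp only [List.length_cons, Nat.add_sub_cancel, List.drop_succ_cons]
  have hsplit : List.range' 1 rest.length
      = List.range' 1 k ++ List.range' (1 + k) (rest.length - k) := by
    have h := List.range'_append (s := 1) (m := k) (n := rest.length - k) (step := 1)
    rw [show 1 + 1 * k = 1 + k by ring] at h
    rw [show k + (rest.length - k) = rest.length by omega] at h
    exact h.symm
  rw [hsplit, List.filter_append]
  have h1 : (List.range' 1 k).filter
      (fun r => (c :: rest).getD r [] != (c :: rest).getD (r - 1) []) = [] := by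
    apply List.filter_eq_nil_iff.mpr
    intro r hr
    have hrr := List.mem_range'_1.mp hr
    obtain ⟨j, rfl⟩ : ∃ j, r = j + 1 := ⟨r - 1, by omega⟩
    have ha : (c :: rest).getD (j + 1) [] = c := by
      simp only [List.getD_cons_succ]
      exact hgetD j (by omega)
    have hb : (c :: rest).getD (j + 1 - 1) [] = c := by
      cases j with
      | zero => rfl
      | succ j' =>
        simp only [Nat.add_sub_cancel, List.getD_cons_succ]
        exact hgetD j' (by omega)
    rw [ha, hb]
    simp
  rw [h1, List.nil_append]
  by_cases hkm : k < rest.length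
  · rw [if_pos (by omega)]
    have hstep : List.range' (1 + k) (rest.length - k)
        = (k + 1) :: List.range' (k + 2) (rest.length - k - 1) := by
      obtain ⟨t, ht⟩ : ∃ t, rest.length - k = t + 1 := ⟨rest.length - k - 1, by omega⟩
      have h1k : 1 + k = k + 1 := by omega
      have ht2 : t = rest.length - k - 1 := by omega
      rw [ht, List.range'_succ, h1k, ht2]
      congr 2
    rw [hstep]
    have hptrue : ((c :: rest).getD (k + 1) [] != (c :: rest).getD (k + 1 - 1) []) = true := by
      have ha : (c :: rest).getD (k + 1) [] = rest.getD k [] := by simp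
      have hb : (c :: rest).getD (k + 1 - 1) [] = c := by
        cases hc : k with
        | zero => rfl
        | succ k' =>
          simp only [Nat.add_sub_cancel, List.getD_cons_succ]
          exact hgetD k' (by omega)
      rw [ha, hb]
      have := countLead_stop c rest (by omega)
      rw [hk] at this
      simpa using this
    rw [List.filter_cons]
    rw [if_pos hptrue]
    congr 1
    have hshift : List.range' (k + 2) (rest.length - k - 1)
        = (List.range' 1 (rest.length - k - 1)).map (· + (k + 1)) := by
      rw [← range'_shift (k + 1) 1 (rest.length - k - 1)]
      congr 1
      omega
    rw [hshift, List.filter_map]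
    have hlen' : (rest.drop k).length = rest.length - k := by simp
    rw [hlen']
    congr 1
    apply List.filter_congr
    intro r hr
    have hrr := List.mem_range'_1.mp hr
    show ((c :: rest).getD (r + (k + 1)) [] != (c :: rest).getD (r + (k + 1) - 1) [])
        = ((rest.drop k).getD r [] != (rest.drop k).getD (r - 1) [])
    have hA : (c :: rest).getD (r + (k + 1)) [] = (rest.drop k).getD r [] := by
      have he : r + (k + 1) = (k + r) + 1 := by omega
      rw [he, List.getD_cons_succ, getD_drop' rest k r (by omega)]
    have hB : (c :: rest).getD (r + (k + 1) - 1) [] = (rest.drop k).getD (r - 1) [] := by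
      have he : r + (k + 1) - 1 = (k + (r - 1)) + 1 := by omega
      rw [he, List.getD_cons_succ, getD_drop' rest k (r - 1) (by omega)]
    rw [hA, hB]
  · rw [if_neg (by omega), show rest.length - k = 0 by omega]
    simp

theorem zipdiff_shift (xs ys : List Int) (d : Int) :
    (List.zip (xs.map (· + d)) (ys.map (· + d))).map (fun be => be.2 - be.1)
      = (List.zip xs ys).map (fun be => be.2 - be.1) := by
  rw [List.zip_map, List.map_map]
  apply List.map_congr_left
  intro p _
  simp [Prod.map]

theorem zipdiff_cons_shift (C : List Int) (m' d : Int) :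
    (List.zip ((0 : Int) :: ((0 : Int) :: C).map (· + d)) ((((0 : Int) :: C).map (· + d)) ++ [m' + d])).map
        (fun be => be.2 - be.1)
      = d :: (List.zip ((0 : Int) :: C) (C ++ [m'])).map (fun be => be.2 - be.1) := by
  simp only [List.map_cons, List.cons_append, List.zip_cons_cons, List.map_cons]
  congr 1
  · ring
  · rw [show ((0 : Int) + d) :: C.map (· + d) = ((0 : Int) :: C).map (· + d) from by simp,
      show C.map (· + d) ++ [m' + d] = (C ++ [m']).map (· + d) from by simp,
      zipdiff_shift]

theorem runsOf_cons (c : List Char) (rest : List (List Char)) :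
    runsOf (c :: rest) =
      if countLead c rest + 1 < (c :: rest).length
      then ((countLead c rest + 1 : Nat) : Int) :: runsOf ((c :: rest).drop (countLead c rest + 1))
      else [((c :: rest).length : Int)] := by
  obtain ⟨k, hk⟩ : ∃ k, countLead c rest = k := ⟨_, rfl⟩
  rw [hk]
  unfold runsOf
  rw [bnds_cons, hk]
  by_cases hkm : k + 1 < (c :: rest).length
  · rw [if_pos hkm]
    obtain ⟨b', hb'⟩ : ∃ b', bnds ((c :: rest).drop (k + 1)) = b' := ⟨_, rfl⟩
    rw [hb']
    obtain ⟨m', hm'⟩ : ∃ m' : Nat, ((c :: rest).drop (k + 1)).length = m' := ⟨_, rfl⟩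
    rw [hm']
    have hm : ((c :: rest).length : Int) = (m' : Int) + ((k + 1 : Nat) : Int) := by
      simp only [List.length_drop, List.length_cons] at hm'
      simp only [List.length_cons] at hkm ⊢
      omega
    rw [hm]
    have hC : ((k + 1) :: b'.map (· + (k + 1))).map (Nat.cast : Nat → Int)
        = ((0 : Int) :: b'.map (Nat.cast)).map (· + ((k + 1 : Nat) : Int)) := by
      simp only [List.map_cons, List.map_map, List.cons_eq_cons]
      constructor
      · omega
      · apply List.map_congr_left
        intro x _
        simp only [Function.comp_apply]
        push_cast
        ring
    rw [hC, zipdiff_cons_shift, if_pos hkm]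
  · rw [if_neg hkm, if_neg hkm]
    simp

theorem valB_eq_g0 (i : Nat) :
    ∀ L : List (List Char), L ≠ [] → (∀ c ∈ L, c.length = i) → valB (i : Int) L = g0 L := by
  suffices H : ∀ fuel (L : List (List Char)), L.length ≤ fuel → L ≠ [] →
      (∀ c ∈ L, c.length = i) → valB (i : Int) L = g0 L from
    fun L => H L.length L le_rfl
  intro fuel
  induction fuel with
  | zero =>
    intro L hlen hne _
    exact absurd (List.eq_nil_of_length_eq_zero (by omega)) hne
  | succ fuel ih =>
    intro L hlen hne hall
    cases L with
    | nil => exact absurd rfl hne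
    | cons c rest =>
      obtain ⟨k, hk⟩ : ∃ k, countLead c rest = k := ⟨_, rfl⟩
      have hkle : k ≤ rest.length := hk ▸ countLead_le c rest
      have hci : c.length = i := hall c (by simp)
      have hg0 : g0 (c :: rest)
          = ((encChars (1 + (k : Int)) c).length : Int) + g0 (rest.drop k) := by
        show g rest 1 c = _
        rw [gsplit, hk]
      have henc : ((encChars (1 + (k : Int)) c).length : Int)
          = (i : Int) + (if 0 < k then ((PySem.Int.toChars ((k + 1 : Nat) : Int)).length : Int) else 0) := by
        unfold encChars
        by_cases hk0 : k = 0
        · rw [if_pos (by rw [hk0]; norm_num), if_neg (by omega)]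
          simp [hci]
        · rw [if_neg (by omega), if_pos (by omega)]
          rw [show ((k + 1 : Nat) : Int) = 1 + (k : Int) by push_cast; ring]
          simp only [List.length_append, hci]
          push_cast
          ring
      unfold valB
      rw [runsOf_cons, hk]
      by_cases hkm : k + 1 < (c :: rest).length
      · rw [if_pos hkm]
        have hrest : rest.drop k = (c :: rest).drop (k + 1) := by simp
        have hne' : (c :: rest).drop (k + 1) ≠ [] := by
          apply List.length_pos_iff.mp
          simp only [List.length_drop, List.length_cons]
          simp only [List.length_cons] at hkm
          omega
        have hall' : ∀ d ∈ (c :: rest).drop (k + 1), d.length = i :=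
          fun d hd => hall d (List.mem_of_mem_drop hd)
        have hl2 : ((c :: rest).drop (k + 1)).length ≤ fuel := by
          simp only [List.length_drop, List.length_cons]
          simp only [List.length_cons] at hlen
          omega
        have hih := ih ((c :: rest).drop (k + 1)) hl2 hne' hall'
        unfold valB at hih
        rw [hg0, hrest, henc, ← hih]
        simp only [List.length_cons, List.filter_cons]
        by_cases hk0 : 0 < k
        · rw [if_pos (show (decide (1 < ((k + 1 : Nat) : Int))) = true by simp; omega),
            if_pos hk0]
          simp only [List.map_cons, List.sum_cons]
          push_cast
          ring
        · rw [if_neg (show ¬ (decide (1 < ((k + 1 : Nat) : Int))) = true by simp; omega),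
            if_neg hk0]
          push_cast
          ring
      · rw [if_neg hkm]
        have hkeq : k = rest.length := by
          simp only [List.length_cons] at hkm
          omega
        have hdrop : rest.drop k = [] := by rw [hkeq, List.drop_length]
        rw [hg0, hdrop, henc]
        have hm : ((c :: rest).length : Int) = ((k + 1 : Nat) : Int) := by
          simp only [List.length_cons]
          omega
        rw [hm]
        simp only [List.filter_cons, List.filter_nil]
        by_cases hk0 : 0 < k
        · rw [if_pos (show (decide (1 < ((k + 1 : Nat) : Int))) = true by simp; omega),
            if_pos hk0]
          simp [g0]
        · rw [if_neg (show ¬ (decide (1 < ((k + 1 : Nat) : Int))) = true by simp; omega),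
            if_neg hk0]
          simp [g0]

-- chunkList splits into the full chunks and the (possibly empty) short tail
theorem fullChunks_succ (cs : List Char) (i q : Nat) :
    fullChunks cs i (q + 1) = cs.take i :: fullChunks (cs.drop i) i q := by
  unfold fullChunks
  rw [List.range_succ_eq_map, List.map_cons, List.map_map]
  congr 1
  · simp [chunkAt]
  · apply List.map_congr_left
    intro r _
    simp only [Function.comp_apply, chunkAt, Nat.succ_eq_add_one]
    rw [List.drop_drop]
    congr 2
    ring

theorem chunkList_split (i : Nat) (hi : 0 < i) (cs : List Char) :
    chunkList cs i
      = fullChunks cs i (cs.length / i)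
          ++ (if cs.length % i = 0 then [] else [cs.drop ((cs.length / i) * i)]) := by
  suffices H : ∀ n (cs : List Char), cs.length ≤ n →
      chunkList cs i
        = fullChunks cs i (cs.length / i)
            ++ (if cs.length % i = 0 then [] else [cs.drop ((cs.length / i) * i)]) from
    H cs.length cs le_rfl
  intro n
  induction n with
  | zero =>
    intro cs hlen
    have hnil : cs = [] := List.eq_nil_of_length_eq_zero (by omega)
    subst hnil
    rw [chunkList]
    simp [fullChunks]
  | succ n ih =>
    intro cs hlen
    rcases List.eq_nil_or_concat cs with hnil | hcc
    · subst hnil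
      rw [chunkList]
      simp [fullChunks]
    · have hne : cs ≠ [] := by rcases hcc with ⟨l, a, rfl⟩; simp
      have hpos : 0 < cs.length := List.length_pos_iff.mpr hne
      rw [chunkList, dif_neg (by simp [hne]; omega)]
      by_cases hlt : cs.length < i
      · have hq : cs.length / i = 0 := Nat.div_eq_of_lt hlt
        have hr : cs.length % i = cs.length := Nat.mod_eq_of_lt hlt
        rw [hq, hr, if_neg (by omega)]
        have htake : cs.take i = cs := List.take_of_length_le (by omega)
        have hdrop : cs.drop i = [] := List.drop_eq_nil_of_le (by omega)
        rw [htake, hdrop, chunkList]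
        simp [fullChunks]
      · have hge : i ≤ cs.length := by omega
        have hlen' : (cs.drop i).length = cs.length - i := by simp [List.length_drop]
        have hsum : cs.length = (cs.length - i) + i := by omega
        have hqeq : cs.length / i = (cs.length - i) / i + 1 := by
          conv_lhs => rw [hsum]
          rw [Nat.add_div_right _ hi]
        have hreq : cs.length % i = (cs.length - i) % i := by
          conv_lhs => rw [hsum]
          rw [Nat.add_mod_right]
        have hih := ih (cs.drop i) (by omega)
        rw [hlen'] at hih
        rw [hqeq, hreq, fullChunks_succ, List.cons_append, hih]
        congr 2
        by_cases h0 : (cs.length - i) % i = 0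
        · rw [if_pos h0, if_pos h0]
        · rw [if_neg h0, if_neg h0]
          rw [List.drop_drop]
          congr 1
          ring

theorem chunkAt_length (cs : List Char) (i r : Nat) (h : r * i + i ≤ cs.length) :
    (chunkAt cs i r).length = i := by
  simp [chunkAt, List.length_take, List.length_drop]
  omega

theorem g_append_last (T : List Char) (i : Nat) (hT : T.length ≠ i) :
    ∀ (chs : List (List Char)) (cnt : Int) (temp : List Char), temp.length = i →
      (∀ c ∈ chs, c.length = i) →
      g (chs ++ [T]) cnt temp = g chs cnt temp + (T.length : Int) := by
  intro chs
  induction chs with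
  | nil =>
    intro cnt temp htemp _
    have hne : T ≠ temp := by intro h; rw [h] at hT; exact hT htemp
    simp [g, hne, encChars]
  | cons d chs ih =>
    intro cnt temp htemp hall
    by_cases hd : d = temp
    · simp only [List.cons_append, g, if_pos hd]
      exact ih (cnt + 1) temp htemp (fun c hc => hall c (by simp [hc]))
    · simp only [List.cons_append, g, if_neg hd]
      rw [ih 1 d (hall d (by simp)) (fun c hc => hall c (by simp [hc]))]
      ring

theorem g0_append_last (F : List (List Char)) (T : List Char) (i : Nat)
    (hF : F ≠ []) (hall : ∀ c ∈ F, c.length = i) (hT : T.length ≠ i) :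
    g0 (F ++ [T]) = g0 F + (T.length : Int) := by
  cases F with
  | nil => exact absurd rfl hF
  | cons c F' =>
    simp only [List.cons_append, g0]
    exact g_append_last T i hT F' 1 c (hall c (by simp)) (fun d hd => hall d (by simp [hd]))

theorem chunkAt_getElem (cs : List Char) (i r t : Nat) (ht : t < i) (hr : r * i + i ≤ cs.length) :
    (chunkAt cs i r)[t]'(by rw [chunkAt_length cs i r hr]; exact ht) = cs[r * i + t]'(by omega) := by
  simp only [chunkAt]
  rw [List.getElem_take, List.getElem_drop]

-- the port's boundary test (a char-level any) equals inequality of adjacent chunks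
theorem any_eq_chunk_ne (cs : List Char) (i j : Nat)
    (hend : (j + 1) * i + i ≤ cs.length) :
    ((List.range i).any (fun t => cs.getD ((j + 1) * i + t) ' ' != cs.getD (j * i + t) ' '))
      = (chunkAt cs i (j + 1) != chunkAt cs i j) := by
  have hexp : (j + 1) * i = j * i + i := by ring
  have hji : j * i + i ≤ cs.length := by omega
  have hl1 := chunkAt_length cs i (j + 1) hend
  have hl0 := chunkAt_length cs i j hji
  have hget1 : ∀ t (ht : t < i), cs.getD ((j + 1) * i + t) ' '
      = (chunkAt cs i (j + 1))[t]'(by omega) := by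
    intro t ht
    rw [List.getD_eq_getElem _ _ (by omega), chunkAt_getElem cs i (j + 1) t ht hend]
  have hget0 : ∀ t (ht : t < i), cs.getD (j * i + t) ' '
      = (chunkAt cs i j)[t]'(by omega) := by
    intro t ht
    rw [List.getD_eq_getElem _ _ (by omega), chunkAt_getElem cs i j t ht hji]
  by_cases h : chunkAt cs i (j + 1) = chunkAt cs i j
  · rw [h, bne_self_eq_false]
    apply List.any_eq_false.mpr
    intro t htmem
    have ht : t < i := List.mem_range.mp htmem
    rw [hget1 t ht, hget0 t ht]
    have he : (chunkAt cs i (j + 1))[t]'(by omega) = (chunkAt cs i j)[t]'(by omega) := by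
      congr 1
    rw [he]
    simp
  · rw [show (chunkAt cs i (j + 1) != chunkAt cs i j) = true from by simpa using h]
    apply List.any_eq_true.mpr
    by_contra hno
    push Not at hno
    apply h
    apply List.ext_getElem (by omega)
    intro t h1 h2
    have ht : t < i := by omega
    have hn := hno t (List.mem_range.mpr ht)
    rw [hget1 t ht, hget0 t ht] at hn
    simpa using hn

theorem clen_eq (cs : List Char) (i : Nat) (hi : 0 < i) (h2 : 2 * i ≤ cs.length) :
    clen cs (i : Int)
      = valB (i : Int) (fullChunks cs i (cs.length / i)) + ((cs.length % i : Nat) : Int) := by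
  have hnf1 : 1 ≤ cs.length / i := (Nat.le_div_iff_mul_le hi).mpr (by omega)
  have hFlen : (fullChunks cs i (cs.length / i)).length = cs.length / i := by
    simp [fullChunks]
  have hbounds :
      (PySem.List.pyRange 1 ((cs.length / i : Nat) : Int) 1).filter
        (fun r => (PySem.List.pyRange 0 ((i : Nat) : Int) 1).any
          (fun t => PySem.List.pyGetD cs (r * (i : Int) + t) ' '
            != PySem.List.pyGetD cs ((r - 1) * (i : Int) + t) ' '))
      = (bnds (fullChunks cs i (cs.length / i))).map (Nat.cast) := by
    have hr1 : PySem.List.pyRange 1 ((cs.length / i : Nat) : Int) 1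
        = (List.range' 1 (cs.length / i - 1)).map (Nat.cast) := by
      rw [PySem.List.pyRange_one, List.range'_eq_map_range, List.map_map]
      have htn : (((cs.length / i : Nat) : Int) - 1).toNat = cs.length / i - 1 := by omega
      rw [htn]
      apply List.map_congr_left
      intro x _
      simp only [Function.comp_apply]
      push_cast
      ring
    rw [hr1, List.filter_map]
    congr 1
    unfold bnds
    rw [hFlen]
    apply List.filter_congr
    intro r hr
    have hrr := List.mem_range'_1.mp hr
    obtain ⟨j, rfl⟩ : ∃ j, r = j + 1 := ⟨r - 1, by omega⟩
    have hjnf : j + 1 < cs.length / i := by omega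
    have hend : (j + 1) * i + i ≤ cs.length := by
      have hmul : (j + 2) * i ≤ (cs.length / i) * i := Nat.mul_le_mul_right i (by omega)
      have hdm : (cs.length / i) * i ≤ cs.length := Nat.div_mul_le_self _ _
      have hexp : (j + 2) * i = (j + 1) * i + i := by ring
      omega
    show ((PySem.List.pyRange 0 ((i : Nat) : Int) 1).any
        (fun t => PySem.List.pyGetD cs (((j + 1 : Nat) : Int) * (i : Int) + t) ' '
          != PySem.List.pyGetD cs ((((j + 1 : Nat) : Int) - 1) * (i : Int) + t) ' '))
      = ((fullChunks cs i (cs.length / i)).getD (j + 1) []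
          != (fullChunks cs i (cs.length / i)).getD (j + 1 - 1) [])
    rw [PySem.List.pyRange_zero_natCast i, List.any_map]
    have hc1 : ∀ t : Nat, ((j + 1 : Nat) : Int) * (i : Int) + (t : Int)
        = (((j + 1) * i + t : Nat) : Int) := by intro t; push_cast; ring
    have hc0 : ∀ t : Nat, (((j + 1 : Nat) : Int) - 1) * (i : Int) + (t : Int)
        = ((j * i + t : Nat) : Int) := by intro t; push_cast; ring
    simp only [Function.comp_def, hc1, hc0, PySem.List.pyGetD_natCast]
    rw [any_eq_chunk_ne cs i j hend]
    have hg1 : (fullChunks cs i (cs.length / i)).getD (j + 1) [] = chunkAt cs i (j + 1) := by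
      unfold fullChunks
      exact PySem.List.getD_map_range _ _ _ _ hjnf
    have hg0 : (fullChunks cs i (cs.length / i)).getD (j + 1 - 1) [] = chunkAt cs i j := by
      unfold fullChunks
      simp only [Nat.add_sub_cancel]
      exact PySem.List.getD_map_range _ _ _ _ (by omega)
    rw [hg1, hg0]
  unfold clen
  simp only [PySem.Int.floordiv_natCast, PySem.Int.mod_natCast, hbounds]
  unfold valB runsOf
  rw [hFlen]

theorem fA_eq_clen (cs : List Char) (i : Nat) (hi : 0 < i) (h2 : 2 * i ≤ cs.length) :
    fA cs (i : Int) = clen cs (i : Int) := by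
  have hn : 0 < cs.length := by omega
  have hnf2 : 2 ≤ cs.length / i := (Nat.le_div_iff_mul_le hi).mpr (by omega)
  have hnf : 0 < cs.length / i := by omega
  have hFne : fullChunks cs i (cs.length / i) ≠ [] := by
    simp [fullChunks]
    omega
  have hall : ∀ c ∈ fullChunks cs i (cs.length / i), c.length = i := by
    intro c hc
    simp only [fullChunks, List.mem_map, List.mem_range] at hc
    obtain ⟨r, hr, rfl⟩ := hc
    apply chunkAt_length
    have h1 : (r + 1) * i ≤ (cs.length / i) * i := Nat.mul_le_mul_right i (by omega)
    have h2 : (r + 1) * i = r * i + i := by ring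
    have hdm : (cs.length / i) * i ≤ cs.length := Nat.div_mul_le_self _ _
    omega
  rw [fA_eq_g0 cs i hi (by omega), chunkList_split i hi cs, clen_eq cs i hi h2]
  by_cases hrem : cs.length % i = 0
  · rw [if_pos hrem]
    simp only [List.append_nil, hrem, Nat.cast_zero, add_zero]
    exact (valB_eq_g0 i _ hFne hall).symm
  · rw [if_neg hrem]
    have hTlen : (cs.drop ((cs.length / i) * i)).length = cs.length % i := by
      simp [List.length_drop]
      have hdm := Nat.div_add_mod cs.length i
      have hcomm : (cs.length / i) * i = i * (cs.length / i) := Nat.mul_comm _ _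
      omega
    rw [g0_append_last _ _ i hFne hall (by rw [hTlen]; have := Nat.mod_lt cs.length hi; omega)]
    rw [valB_eq_g0 i _ hFne hall, hTlen]

theorem solution_eq_A (s : String) (h1 : ¬ s.toList.length = 1) :
    solution s
      = match PySem.List.min?
            ((PySem.List.pyRange 1 (PySem.Int.floordiv (s.toList.length : Int) 2 + 1) 1).map
              (fA s.toList)) (fun x => x) with
        | some m => m
        | none => 0 := by
  unfold solution
  rw [if_neg h1]
  show (match PySem.List.min?
        (List.foldl (fun (acc : List Int) (i : Int) => acc ++ [fA s.toList i]) []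
          (PySem.List.pyRange 1 (PySem.Int.floordiv (s.toList.length : Int) 2 + 1) 1))
        (fun x => x) with
      | some m => m
      | none => 0) = _
  rw [PySem.List.foldl_append_singleton_eq_map]
  simp

theorem solution_eq_B (s : String) (h1 : ¬ s.toList.length = 1) :
    solution_alt s
      = match PySem.List.min?
            ((PySem.List.pyRange 1 (PySem.Int.floordiv (s.toList.length : Int) 2 + 1) 1).map
              (fun i => clen s.toList i)) (fun x => x) with
        | some m => m
        | none => 0 := by
  unfold solution_alt
  rw [if_neg h1]

-- ===== VERDICT (by name: the statement is the Claim_ definition above) =====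
theorem solution_spec : Claim_equal_solution := by
  intro s _ hpre
  unfold Spec_solution
  by_cases h1 : s.toList.length = 1
  · show solution s = solution_alt s
    simp [solution, solution_alt, h1]
  · have hne : s.toList ≠ [] := by
      intro h
      exact hpre (String.toList_eq_nil_iff.mp h)
    have hn2 : 2 ≤ s.toList.length := by
      have := List.length_pos_iff.mpr hne
      omega
    show solution s = solution_alt s
    rw [solution_eq_A s h1, solution_eq_B s h1]
    have hmapeq : (PySem.List.pyRange 1 (PySem.Int.floordiv (s.toList.length : Int) 2 + 1) 1).map
        (fA s.toList)
        = (PySem.List.pyRange 1 (PySem.Int.floordiv (s.toList.length : Int) 2 + 1) 1).map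
            (fun i => clen s.toList i) := by
      apply List.map_congr_left
      intro i hi
      have hfd : PySem.Int.floordiv (s.toList.length : Int) 2 = (s.toList.length : Int) / 2 :=
        PySem.Int.floordiv_eq_ediv_of_pos (by norm_num)
      rw [hfd] at hi
      have hmem := PySem.List.mem_pyRange_one.mp hi
      obtain ⟨i', rfl⟩ : ∃ i' : Nat, i = (i' : Int) :=
        ⟨i.toNat, (Int.toNat_of_nonneg (by omega)).symm⟩
      apply fA_eq_clen
      · exact_mod_cast hmem.1
      · have : (i' : Int) ≤ (s.toList.length : Int) / 2 := by omega
        omega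
    rw [hmapeq]
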